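-- pv_equiv track=rewrite | github.com/bryant273092/Python-Projects | exam/exam.py | unique_supplier
-- ===== SOURCE A (Python) =====
-- from collections import defaultdict    # use if you want (see problem descriptions)
--
-- def unique_supplier (db : {str:{str:int}}) -> {str:{str}}:
--     new_dict = defaultdict(set)
--     for city in db:
--         for item, quantity in db[city].items():
--             for cities in db:
--                 if item in db[cities] and cities != city:
--                     break
--             else:
--                 new_dict[city].add(item)
--
--
--
--
--     return new_dict
-- ===== SOURCE B (Python) =====
-- from collections import defaultdict
--
-- def unique_supplier(db: {str: {str: int}}) -> {str: {str}}:
--     # inverted index: item -> list of cities supplying it, in first-encounter order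
--     item_cities = defaultdict(list)
--     for city in db:
--         for item in db[city]:
--             item_cities[item].append(city)
--     new_dict = defaultdict(set)
--     for item, cities in item_cities.items():
--         if len(cities) == 1:
--             new_dict[cities[0]].add(item)
--     return new_dict
-- ===== Notes on version B (the rewrite author's own statement) =====
-- stated objective: faster
-- what changed: A scans every city again for each (city,item) pair to test uniqueness; B builds an inverted index item->list-of-cities in one pass and then emits, per item with exactly one supplier, that item into the result by iterating the index, removing the inner scan entirely.
import Mathlib
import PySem

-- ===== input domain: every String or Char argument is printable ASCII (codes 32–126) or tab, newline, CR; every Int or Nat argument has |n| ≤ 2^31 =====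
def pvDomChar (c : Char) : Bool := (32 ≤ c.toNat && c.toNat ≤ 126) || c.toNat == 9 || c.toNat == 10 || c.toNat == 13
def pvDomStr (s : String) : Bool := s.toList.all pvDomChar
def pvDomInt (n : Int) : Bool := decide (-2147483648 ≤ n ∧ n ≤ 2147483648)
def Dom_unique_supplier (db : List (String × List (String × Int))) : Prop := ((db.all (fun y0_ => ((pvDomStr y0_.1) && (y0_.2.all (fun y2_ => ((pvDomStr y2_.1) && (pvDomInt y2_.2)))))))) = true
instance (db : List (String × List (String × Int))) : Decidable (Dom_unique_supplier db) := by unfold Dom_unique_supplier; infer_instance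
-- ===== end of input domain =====

-- B replaces A's per-(city,item) rescan of all cities by a one-pass inverted index item→cities,
-- then emits uniquely supplied items by iterating that index (objective: faster, fewer passes).

-- ===== PORT A =====
-- the dict argument arrives as an association list; both ports read it as the Python dict it denotes
def unique_supplier (db : List (String × List (String × Int))) : List (String × List String) :=
  let d : PySem.Dict String (PySem.Dict String Int) :=
    PySem.Dict.ofList (db.map (fun p => (p.1, PySem.Dict.ofList p.2)))
  (d.keys.foldl (fun nd city =>
      (d.getD city PySem.Dict.empty).items.foldl (fun nd iq =>
        if d.keys.any (fun cities => (d.getD cities PySem.Dict.empty).contains iq.1 && cities != city)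
        then nd   -- the inner for-loop hit `break`: some other city stocks the item
        else nd.insert city (PySem.Set.add (nd.getD city PySem.Set.empty) iq.1))
        nd)
    PySem.Dict.empty).items

-- ===== PORT B =====
def unique_supplier_alt (db : List (String × List (String × Int))) : List (String × List String) :=
  let d : PySem.Dict String (PySem.Dict String Int) :=
    PySem.Dict.ofList (db.map (fun p => (p.1, PySem.Dict.ofList p.2)))
  let item_cities : PySem.Dict String (List String) :=
    d.keys.foldl (fun ic city =>
      (d.getD city PySem.Dict.empty).keys.foldl (fun ic item => ic.modify item [] (· ++ [city])) ic)
      PySem.Dict.empty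
  (item_cities.items.foldl (fun nd p =>
      if p.2.length == 1
      then nd.insert (PySem.List.pyGetD p.2 0 "")
             (PySem.Set.add (nd.getD (PySem.List.pyGetD p.2 0 "") PySem.Set.empty) p.1)
      else nd)
    PySem.Dict.empty).items

-- ===== PRECONDITION & SPEC =====
def Spec_unique_supplier (db : List (String × List (String × Int))) (out : List (String × List String)) : Prop := out = unique_supplier_alt db
instance (db : List (String × List (String × Int))) (out : List (String × List String)) : Decidable (Spec_unique_supplier db out) := by unfold Spec_unique_supplier; infer_instance

-- ===== CLAIM (what is proved, stated in full; the proofs are below) =====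
def Claim_equal_unique_supplier : Prop := ∀ (db : List (String × List (String × Int))), Dom_unique_supplier db → Spec_unique_supplier db (unique_supplier db)

-- ===== LEMMAS AND PROOFS =====

def pvPairs (KL : List (String × List String)) : List (String × String) :=
  KL.flatMap (fun q => q.2.map (fun i => (i, q.1)))

def pvF (ps : List (String × String)) (i : String) : Option (String × String) :=
  match (ps.filter (fun p => p.1 == i)).map Prod.snd with
  | [c] => some (i, c)
  | _ => none

theorem pv_foldl_keys_getD {ν β : Type} (d : PySem.Dict String ν) (hnd : d.keys.Nodup)
    (f : β → String → ν → β) (b : β) (v0 : ν) :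
    d.keys.foldl (fun acc c => f acc c (d.getD c v0)) b = d.items.foldl (fun acc q => f acc q.1 q.2) b := by
  simp only [PySem.Dict.keys] at *
  rw [List.foldl_map]
  apply PySem.List.foldl_congr_mem
  intro acc q hq
  rw [PySem.Dict.getD_of_mem_items d (k := q.1) (v := q.2) (by simpa using hq) (by simpa using hnd)]

theorem pv_mem_items_update {κ ν : Type} [BEq κ] [LawfulBEq κ] (l : List (κ × ν)) (d : PySem.Dict κ ν)
    (p : κ × ν) (hp : p ∈ (d.update l).items) : p ∈ d.items ∨ p ∈ l := by
  induction l generalizing d with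
  | nil => exact Or.inl hp
  | cons q t ih =>
    rcases ih (d := d.insert q.1 q.2) (by simpa [PySem.Dict.update] using hp) with h | h
    · rcases (PySem.Dict.mem_items_insert d q.1 q.2 p).1 h with h' | h'
      · exact Or.inr (by simp [h'])
      · exact Or.inl h'.1
    · exact Or.inr (List.mem_cons_of_mem _ h)

theorem pv_filterMap_knockout (l : List String) (F : String → Option (String × String)) (i : String)
    (hF : ∀ j y, F j = some y → y.1 = j) :
    l.filterMap (fun j => if j = i then none else F j) = (l.filterMap F).filter (fun y => !(y.1 == i)) := by
  induction l with
  | nil => rfl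
  | cons a t ih =>
    by_cases ha : a = i
    · subst ha
      rcases h : F a with _ | y
      · simp [h, ih]
      · simp [h, ih, hF a y h]
    · rcases h : F a with _ | y
      · simp [h, ih, ha]
      · have := hF a y h
        simp [h, ih, ha, this]

theorem pv_cnt (i : String) (KL : List (String × List String)) (q0 : String × List String)
    (h1 : (KL.map Prod.fst).Nodup) (h2 : ∀ q ∈ KL, q.2.Nodup)
    (hq0 : q0 ∈ KL) (hi : i ∈ q0.2) :
    (KL.map (fun q => q.2.count i)).sum = 1 ↔ ∀ q ∈ KL, i ∈ q.2 → q.1 = q0.1 := by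
  induction KL with
  | nil => cases hq0
  | cons q T ih =>
    have hnd1 : q.1 ∉ T.map Prod.fst := by simpa using (List.nodup_cons.1 h1).1
    have hnd2 : (T.map Prod.fst).Nodup := (List.nodup_cons.1 h1).2
    rcases List.mem_cons.1 hq0 with rfl | hq0T
    · -- q0 is the head
      have hc1 : q0.2.count i = 1 :=
        le_antisymm ((List.nodup_iff_count_le_one.1 (h2 q0 (by simp))) i) (List.count_pos_iff.2 hi)
      simp only [List.map_cons, List.sum_cons, hc1]
      constructor
      · intro h q hq hiq
        rcases List.mem_cons.1 hq with rfl | hqT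
        · rfl
        · exfalso
          have hz : (T.map (fun q => q.2.count i)).sum = 0 := by omega
          have := (List.sum_eq_zero_iff.1 (by exact_mod_cast hz)) (q.2.count i) (by
            exact List.mem_map.2 ⟨q, hqT, rfl⟩)
          have : i ∉ q.2 := by
            intro hmem; exact absurd this (by simpa using (List.count_pos_iff.2 hmem).ne')
          exact this hiq
      · intro h
        have hz : (T.map (fun q => q.2.count i)).sum = 0 := by
          apply List.sum_eq_zero_iff.2
          intro x hx
          rcases List.mem_map.1 hx with ⟨q, hqT, rfl⟩
          have : i ∉ q.2 := by
            intro hmem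
            have := h q (List.mem_cons_of_mem _ hqT) hmem
            exact hnd1 (this ▸ List.mem_map.2 ⟨q, hqT, rfl⟩)
          simpa using List.count_eq_zero.2 this
        omega
    · -- q0 in the tail
      have hq1ne : q.1 ≠ q0.1 := by
        intro h; exact hnd1 (h ▸ List.mem_map.2 ⟨q0, hq0T, rfl⟩)
      have hS : 1 ≤ (T.map (fun q => q.2.count i)).sum := by
        have hc1 : q0.2.count i = 1 :=
          le_antisymm ((List.nodup_iff_count_le_one.1 (h2 q0 hq0)) i) (List.count_pos_iff.2 hi)
        have hmem : (1 : ℕ) ∈ T.map (fun q => q.2.count i) :=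
          hc1 ▸ List.mem_map.2 ⟨q0, hq0T, rfl⟩
        exact List.single_le_sum (by simp) _ hmem
      have ihr := ih hnd2 (fun q hq => h2 q (List.mem_cons_of_mem _ hq)) hq0T
      simp only [List.map_cons, List.sum_cons]
      constructor
      · intro h q' hq' hiq'
        have hq0c : q.2.count i = 0 := by omega
        rcases List.mem_cons.1 hq' with rfl | hq'T
        · exact absurd hiq' (List.count_eq_zero.1 hq0c)
        · exact (ihr.1 (by omega)) q' hq'T hiq'
      · intro h
        have hhead : i ∉ q.2 := by
          intro hmem; exact hq1ne (h q (by simp) hmem)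
        have := ihr.2 (fun q' hq' hiq' => h q' (List.mem_cons_of_mem _ hq') hiq')
        have hz : q.2.count i = 0 := List.count_eq_zero.2 hhead
        omega

theorem pv_L1 (ps : List (String × String)) :
    (PySem.Set.ofList (ps.map Prod.fst)).filterMap (pvF ps)
      = ps.filter (fun p => (ps.map Prod.fst).count p.1 == 1) := by
  induction ps using List.reverseRecOn with
  | nil => rfl
  | append_singleton ps pc ih =>
    obtain ⟨i, c⟩ := pc
    have hmap : (ps ++ [(i, c)]).map Prod.fst = ps.map Prod.fst ++ [i] := by simp
    by_cases hmem : i ∈ ps.map Prod.fst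
    · -- i already seen: its group grows beyond one city; entries with item i leave both sides
      have hpos : 0 < (ps.map Prod.fst).count i := List.count_pos_iff.2 hmem
      have hset : PySem.Set.ofList ((ps ++ [(i, c)]).map Prod.fst) = PySem.Set.ofList (ps.map Prod.fst) := by
        rw [hmap, PySem.Set.ofList_append_singleton, PySem.Set.add_of_mem (by simpa [PySem.Set.mem_ofList] using hmem)]
      have hFi : pvF (ps ++ [(i, c)]) i = none := by
        have hne : (ps.filter (fun p => p.1 == i)) ≠ [] := by
          rcases List.mem_map.1 hmem with ⟨p, hp, rfl⟩
          exact List.ne_nil_of_mem (List.mem_filter.2 ⟨hp, by simp⟩)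
        unfold pvF
        rw [List.filter_append]
        rcases hl : ps.filter (fun p => p.1 == i) with _ | ⟨a, t⟩
        · exact absurd hl hne
        · rw [hl]
          have hflt : List.filter (fun p => p.1 == i) [(i, c)] = [(i, c)] := by simp
          rw [hflt]
          cases ht : (t ++ [(i, c)]).map Prod.snd with
          | nil => simp at ht
          | cons b u => simp [List.cons_append, ht]
      have hcong : ∀ j ∈ PySem.Set.ofList (ps.map Prod.fst),
          pvF (ps ++ [(i, c)]) j = if j = i then none else pvF ps j := by
        intro j hj
        by_cases hji : j = i
        · simp [hji, hFi]
        · unfold pvF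
          rw [List.filter_append]
          simp [Ne.symm hji, hji]
      rw [hset, List.filterMap_congr hcong,
        pv_filterMap_knockout _ _ _ (by
          intro j y hy
          unfold pvF at hy
          rcases hl : (ps.filter (fun p => p.1 == j)).map Prod.snd with _ | ⟨a, t⟩ <;> rw [hl] at hy
          · simp at hy
          · rcases t with _ | _
            · simp at hy; simp [← hy]
            · simp at hy),
        ih, List.filter_filter]
      rw [List.filter_append]
      have hlast : List.filter (fun p => ((ps ++ [(i, c)]).map Prod.fst).count p.1 == 1) [(i, c)] = [] := by
        have h1 : ((ps ++ [(i, c)]).map Prod.fst).count i = (ps.map Prod.fst).count i + 1 := by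
          rw [hmap, List.count_append]
          simp
        rw [List.filter_cons_of_neg (by simp; omega)]
        rfl
      rw [hlast, List.append_nil]
      apply List.filter_congr
      intro p hp
      rcases eq_or_ne p.1 i with hpi | hpi
      · have hc : 0 < (ps.map Prod.fst).count p.1 :=
          List.count_pos_iff.2 (List.mem_map.2 ⟨p, hp, rfl⟩)
        have h1 : List.count p.1 [i] = 1 := by simp [hpi]
        have hx : ((ps ++ [(i, c)]).map Prod.fst).count p.1 ≠ 1 := by
          rw [hmap, List.count_append, h1]
          omega
        rw [hpi] at hx hc
        simp [hpi]
        omega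
      · have h1 : List.count p.1 [i] = 0 := by simp [Ne.symm hpi]
        rw [hmap, List.count_append, h1, Nat.add_zero]
        simp [hpi]
    · -- i is new: (i, c) is appended to both sides
      have hset : PySem.Set.ofList ((ps ++ [(i, c)]).map Prod.fst)
          = PySem.Set.ofList (ps.map Prod.fst) ++ [i] := by
        rw [hmap, PySem.Set.ofList_append_singleton,
          PySem.Set.add_of_not_mem (by simpa [PySem.Set.mem_ofList] using hmem)]
      have hfe : ps.filter (fun p => p.1 == i) = [] := by
        apply List.filter_eq_nil_iff.2
        intro p hp
        simp only [beq_iff_eq]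
        intro h
        exact hmem (h ▸ List.mem_map.2 ⟨p, hp, rfl⟩)
      have hFi : pvF (ps ++ [(i, c)]) i = some (i, c) := by
        unfold pvF
        rw [List.filter_append, hfe]
        simp
      have hcong : ∀ j ∈ PySem.Set.ofList (ps.map Prod.fst),
          pvF (ps ++ [(i, c)]) j = pvF ps j := by
        intro j hj
        have hji : j ≠ i := by
          intro h; exact hmem (by simpa [PySem.Set.mem_ofList, h] using hj)
        unfold pvF
        rw [List.filter_append]
        simp [Ne.symm hji]
      rw [hset, List.filterMap_append, List.filterMap_congr hcong, ih]
      simp only [List.filterMap_cons, hFi, List.filterMap_nil]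
      rw [List.filter_append]
      have h0 : List.count i (ps.map Prod.fst) = 0 := List.count_eq_zero.2 hmem
      have hcnt : ((ps ++ [(i, c)]).map Prod.fst).count i = 1 := by
        rw [hmap, List.count_append, h0]
        simp
      have hlast : List.filter (fun p => ((ps ++ [(i, c)]).map Prod.fst).count p.1 == 1) [(i, c)] = [(i, c)] := by
        rw [List.filter_cons_of_pos (by simp [h0])]
        rfl
      rw [hlast]
      have hfc : List.filter (fun p => ((ps ++ [(i, c)]).map Prod.fst).count p.1 == 1) ps
          = List.filter (fun p => (ps.map Prod.fst).count p.1 == 1) ps := by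
        apply List.filter_congr
        intro p hp
        have hpi : p.1 ≠ i := by
          intro h; exact hmem (h ▸ List.mem_map.2 ⟨p, hp, rfl⟩)
        have h1 : List.count p.1 [i] = 0 := by simp [Ne.symm hpi]
        rw [hmap, List.count_append, h1, Nat.add_zero]
      rw [hfc]

theorem pv_core (KL : List (String × List String))
    (h1 : (KL.map Prod.fst).Nodup) (h2 : ∀ q ∈ KL, q.2.Nodup) :
    (pvPairs KL).filter (fun p => !(KL.any (fun q => q.2.contains p.1 && q.1 != p.2)))
      = (PySem.Set.ofList ((pvPairs KL).map Prod.fst)).filterMap (pvF (pvPairs KL)) := by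
  rw [pv_L1]
  apply List.filter_congr
  intro p hp
  obtain ⟨q0, hq0, i, hi, hpe⟩ : ∃ q0 ∈ KL, ∃ i ∈ q0.2, p = (i, q0.1) := by
    rcases List.mem_flatMap.1 hp with ⟨q0, hq0, hpm⟩
    rcases List.mem_map.1 hpm with ⟨i, hi, hie⟩
    exact ⟨q0, hq0, i, hi, hie.symm⟩
  subst hpe
  have hmapfst : (pvPairs KL).map Prod.fst = KL.flatMap (fun q => q.2) := by
    simp [pvPairs, List.map_flatMap, List.map_map, Function.comp_def]
  rw [hmapfst, List.count_flatMap]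
  apply Bool.eq_iff_iff.2
  have hsum := pv_cnt i KL q0 h1 h2 hq0 hi
  simp only [Bool.not_eq_true', List.any_eq_false, beq_iff_eq, Function.comp_def]
  constructor
  · intro h
    refine hsum.2 (fun q hq hiq => ?_)
    have hq' := h q hq
    simp [hiq] at hq'
    exact hq'
  · intro h q hq
    by_cases hiq : i ∈ q.2
    · have := hsum.1 h q hq hiq
      simp [hiq, this]
    · simp [hiq]

theorem pv_main (d : PySem.Dict String (PySem.Dict String Int))
    (hk : d.keys.Nodup) (hin : ∀ q ∈ d.items, q.2.keys.Nodup) :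
    (d.keys.foldl (fun nd city =>
        (d.getD city PySem.Dict.empty).items.foldl (fun nd iq =>
          if d.keys.any (fun cities => (d.getD cities PySem.Dict.empty).contains iq.1 && cities != city)
          then nd
          else nd.insert city (PySem.Set.add (nd.getD city PySem.Set.empty) iq.1))
          nd)
      PySem.Dict.empty).items
    = ((d.keys.foldl (fun ic city =>
          (d.getD city PySem.Dict.empty).keys.foldl (fun ic item => ic.modify item [] (· ++ [city])) ic)
          PySem.Dict.empty).items.foldl (fun nd p =>
        if p.2.length == 1
        then nd.insert (PySem.List.pyGetD p.2 0 "")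
               (PySem.Set.add (nd.getD (PySem.List.pyGetD p.2 0 "") PySem.Set.empty) p.1)
        else nd)
      PySem.Dict.empty).items := by
  have hKL1 : ((d.items.map (fun q => (q.1, q.2.keys))).map Prod.fst).Nodup := by
    simpa [List.map_map, Function.comp_def, PySem.Dict.keys] using hk
  have hKL2 : ∀ q ∈ d.items.map (fun q => (q.1, q.2.keys)), q.2.Nodup := by
    intro q hq
    rcases List.mem_map.1 hq with ⟨r, hr, rfl⟩
    exact hin r hr
  set KL : List (String × List String) := d.items.map (fun q => (q.1, q.2.keys)) with hKLdef
  set ps : List (String × String) := pvPairs KL with hpsdef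
  -- the condition A tests, rewritten on the (city, item-keys) view
  have hcond : ∀ it ct, d.keys.any (fun cities => (d.getD cities PySem.Dict.empty).contains it && cities != ct)
      = KL.any (fun q => q.2.contains it && q.1 != ct) := by
    intro it ct
    apply Bool.eq_iff_iff.2
    simp only [List.any_eq_true, Bool.and_eq_true, PySem.Dict.keys, List.mem_map, hKLdef]
    constructor
    · rintro ⟨c', ⟨r, hr, rfl⟩, hcont, hne⟩
      refine ⟨(r.1, r.2.keys), ⟨r, hr, rfl⟩, ?_, hne⟩
      have hg : d.getD r.1 PySem.Dict.empty = r.2 :=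
        PySem.Dict.getD_of_mem_items d (by simpa using hr) (by simpa [PySem.Dict.keys] using hk) _
      rw [hg] at hcont
      simpa [PySem.Dict.contains_iff_mem_keys, PySem.Dict.keys] using hcont
    · rintro ⟨q, ⟨r, hr, rfl⟩, hcont, hne⟩
      refine ⟨r.1, ⟨r, hr, rfl⟩, ?_, hne⟩
      have hg : d.getD r.1 PySem.Dict.empty = r.2 :=
        PySem.Dict.getD_of_mem_items d (by simpa using hr) (by simpa [PySem.Dict.keys] using hk) _
      rw [hg]
      simpa [PySem.Dict.contains_iff_mem_keys, PySem.Dict.keys] using hcont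
  -- A's nested loops as one fold over the flattened (item, city) pairs
  have hA : (d.keys.foldl (fun nd city =>
        (d.getD city PySem.Dict.empty).items.foldl (fun nd iq =>
          if d.keys.any (fun cities => (d.getD cities PySem.Dict.empty).contains iq.1 && cities != city)
          then nd
          else nd.insert city (PySem.Set.add (nd.getD city PySem.Set.empty) iq.1))
          nd)
      PySem.Dict.empty)
      = (ps.filter (fun p => !(KL.any (fun q => q.2.contains p.1 && q.1 != p.2)))).foldl
          (fun nd p => nd.insert p.2 (PySem.Set.add (nd.getD p.2 PySem.Set.empty) p.1))
          PySem.Dict.empty := by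
    rw [pv_foldl_keys_getD d hk (fun nd city v =>
      v.items.foldl (fun nd iq =>
        if d.keys.any (fun cities => (d.getD cities PySem.Dict.empty).contains iq.1 && cities != city)
        then nd
        else nd.insert city (PySem.Set.add (nd.getD city PySem.Set.empty) iq.1)) nd) PySem.Dict.empty PySem.Dict.empty]
    simp only [hcond]
    have hstep : (fun (acc : PySem.Dict String (PySem.Set String)) (q : String × PySem.Dict String Int) =>
        q.2.items.foldl (fun nd iq =>
          if KL.any (fun r => r.2.contains iq.1 && r.1 != q.1) then nd
          else nd.insert q.1 (PySem.Set.add (nd.getD q.1 PySem.Set.empty) iq.1)) acc)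
        = (fun acc q => (q.2.keys.map (fun i => (i, q.1))).foldl (fun nd p =>
            if KL.any (fun r => r.2.contains p.1 && r.1 != p.2) then nd
            else nd.insert p.2 (PySem.Set.add (nd.getD p.2 PySem.Set.empty) p.1)) acc) := by
      funext acc q
      simp only [PySem.Dict.keys, List.map_map, List.foldl_map, Function.comp_def]
    rw [hstep]
    rw [← List.foldl_flatMap]
    have hflat : d.items.flatMap (fun q => q.2.keys.map (fun i => (i, q.1))) = ps := by
      simp [hpsdef, pvPairs, hKLdef, List.flatMap_map]
    rw [hflat]
    rw [List.foldl_filter]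
    apply PySem.List.foldl_congr_mem
    intro nd p hp
    cases h : KL.any (fun q => q.2.contains p.1 && q.1 != p.2) <;> simp
  -- B's first pass: the inverted index as one fold over the same flattened pairs
  have hB : (d.keys.foldl (fun ic city =>
        (d.getD city PySem.Dict.empty).keys.foldl (fun ic item => ic.modify item [] (· ++ [city])) ic)
        PySem.Dict.empty)
      = ps.foldl (fun ic p => ic.modify p.1 [] (· ++ [p.2])) PySem.Dict.empty := by
    refine (pv_foldl_keys_getD d hk (fun ic city v =>
      v.keys.foldl (fun ic item => ic.modify item [] (· ++ [city])) ic) PySem.Dict.empty PySem.Dict.empty).trans ?_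
    have hstep2 : (fun (ic : PySem.Dict String (List String)) (q : String × PySem.Dict String Int) =>
        q.2.keys.foldl (fun ic item => ic.modify item [] (· ++ [q.1])) ic)
        = (fun ic q => ((q.2.keys.map (fun i => (i, q.1))).foldl (fun ic p => ic.modify p.1 [] (· ++ [p.2])) ic)) := by
      funext ic q
      simp only [List.foldl_map]
    rw [hstep2, ← List.foldl_flatMap]
    have hflat : d.items.flatMap (fun q => q.2.keys.map (fun i => (i, q.1))) = ps := by
      simp [hpsdef, pvPairs, hKLdef, List.flatMap_map]
    rw [hflat]
  -- characterise the inverted index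
  have hnod2 : (ps.foldl (fun ic p => ic.modify p.1 [] (· ++ [p.2])) PySem.Dict.empty).keys.Nodup := by
    apply PySem.Dict.nodup_keys_foldl_modify_key ps Prod.fst [] (fun _ p => (· ++ [p.2]))
    simp
  have hkeys2 : (ps.foldl (fun ic p => ic.modify p.1 [] (· ++ [p.2])) PySem.Dict.empty).keys
      = PySem.Set.ofList (ps.map Prod.fst) := by
    rw [PySem.Dict.keys_foldl_modify_key ps Prod.fst [] (fun _ p => (· ++ [p.2])) PySem.Dict.empty]
    simp [PySem.Set.update_nil_left]
  have hitems2 : (ps.foldl (fun ic p => ic.modify p.1 [] (· ++ [p.2])) PySem.Dict.empty).items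
      = (PySem.Set.ofList (ps.map Prod.fst)).map
          (fun i => (i, (ps.filter (fun p => p.1 == i)).map Prod.snd)) := by
    rw [PySem.Dict.items_eq_map_keys _ hnod2 [], hkeys2]
    apply List.map_congr_left
    intro i _
    rw [PySem.Dict.getD_foldl_modify_append ps PySem.Dict.empty i]
    simp
  -- assemble
  rw [hA, pv_core KL hKL1 hKL2, hB, hitems2, List.foldl_map, ← hpsdef, List.foldl_filterMap]
  congr 1
  apply PySem.List.foldl_congr_mem
  intro nd i _
  rcases hG : (ps.filter (fun p => p.1 == i)).map Prod.snd with _ | ⟨c, _ | ⟨b, u⟩⟩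
  · simp [pvF, hG]
  · simp [pvF, hG, PySem.List.pyGetD_zero_cons]
  · simp [pvF, hG]

-- ===== VERDICT (by name: the statement is the Claim_ definition above) =====
theorem unique_supplier_spec : Claim_equal_unique_supplier := by
  intro db _
  show unique_supplier db = unique_supplier_alt db
  have hk : (PySem.Dict.ofList (db.map (fun p => (p.1, PySem.Dict.ofList p.2)))).keys.Nodup :=
    PySem.Dict.nodup_keys_ofList _
  have hin : ∀ q ∈ (PySem.Dict.ofList (db.map (fun p => (p.1, PySem.Dict.ofList p.2)))).items,
      q.2.keys.Nodup := by
    intro q hq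
    have hq' : q ∈ (PySem.Dict.empty.update (db.map (fun p => (p.1, PySem.Dict.ofList p.2)))).items := hq
    rcases pv_mem_items_update (db.map (fun p => (p.1, PySem.Dict.ofList p.2))) PySem.Dict.empty q hq' with h | h
    · simp [PySem.Dict.empty] at h
    · rcases List.mem_map.1 h with ⟨r, hr, rfl⟩
      exact PySem.Dict.nodup_keys_ofList _
  exact pv_main _ hk hin
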